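-- pv_equiv track=rewrite | github.com/hperezbaranda/grn | read-ecuation.py | TesteTlf
-- ===== SOURCE A (Python) =====
-- def TesteTlf(tlf):
-- 	cant1 = len(tlf)-1
-- 	table1= [[None]*(cant1+1) for i in range(2**cant1)]
-- 	for i in range(2**cant1):
-- 		var1 = (bin(i).split('b')[1]).zfill(cant1)
-- 		suma =0
-- 		for j in range(len(var1)):
-- 			table1[i][j] = int(var1[j])
-- 			suma += tlf[j]*int(var1[j])
-- 		table1[i][-1] = 1 if suma >= tlf[-1] else 0
-- 	return table1
-- ===== SOURCE B (Python) =====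
-- def TesteTlf(tlf):
--     cant1 = len(tlf) - 1
--     rows = [[]]
--     for _ in range(cant1):
--         rows = [[0] + r for r in rows] + [[1] + r for r in rows]
--     thr = tlf[-1]
--     return [r + [1 if sum(w * b for w, b in zip(tlf, r)) >= thr else 0] for r in rows]
-- ===== Notes on version B (the rewrite author's own statement) =====
-- stated objective: alternative
-- what changed: B replaces per-row binary-string conversion (bin/zfill + inner digit loop into a preallocated table) by recursive prefix-doubling: the bit rows are built by k doublings ([0]+r rows then [1]+r rows), and the threshold column is appended per row from a zip dot-product.
import Mathlib
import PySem

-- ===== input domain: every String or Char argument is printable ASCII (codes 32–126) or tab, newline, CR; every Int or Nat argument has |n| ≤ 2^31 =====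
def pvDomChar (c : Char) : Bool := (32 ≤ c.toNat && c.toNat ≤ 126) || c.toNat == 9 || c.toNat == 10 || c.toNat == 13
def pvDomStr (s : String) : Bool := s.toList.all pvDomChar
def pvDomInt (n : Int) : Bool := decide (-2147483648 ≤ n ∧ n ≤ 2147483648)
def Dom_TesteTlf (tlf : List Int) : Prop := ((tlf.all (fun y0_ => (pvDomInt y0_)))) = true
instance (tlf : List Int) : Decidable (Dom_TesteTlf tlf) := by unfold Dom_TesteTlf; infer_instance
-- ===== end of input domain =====

-- B replaces A's per-row binary-string construction (bin/zfill + inner digit loop into a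
-- preallocated row) by a prefix-doubling build of the bit rows with a zip dot-product threshold
-- column; equivalence is proved on nonempty tlf (Python A raises TypeError on []).

-- ===== PORT A =====
-- bin(i).split('b')[1] : binary digits of i, MSB first (pvBin gives "0" for i = 0)
def pvBinDigits : Nat → List Int
  | 0 => []
  | n+1 => pvBinDigits ((n+1)/2) ++ [(((n+1) % 2 : Nat) : Int)]
decreasing_by exact Nat.div_lt_self (Nat.succ_pos n) (by norm_num)

def pvBin (n : Nat) : List Int := if n = 0 then [0] else pvBinDigits n

-- .zfill(w) : pad with leading zeros to width w
def pvZfill (w : Nat) (s : List Int) : List Int := List.replicate (w - s.length) 0 ++ s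

def TesteTlf (tlf : List Int) : List (List Int) :=
  let cant1 := tlf.length - 1
  -- Python preallocates each row with None; every cell is overwritten before being read,
  -- so the placeholder row here uses 0.
  (List.range (2 ^ cant1)).map (fun i =>
    let var1 := pvZfill cant1 (pvBin i)
    let st := (List.range var1.length).foldl
      (fun (st : List Int × Int) j =>
        (st.1.set j (var1.getD j 0), st.2 + tlf.getD j 0 * var1.getD j 0))
      (List.replicate (cant1 + 1) (0 : Int), (0 : Int))
    -- table1[i][-1] = …  (the row is nonempty, so index -1 is the last cell)
    st.1.set (st.1.length - 1) (if st.2 ≥ tlf.getD (tlf.length - 1) 0 then 1 else 0))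

-- ===== PORT B =====
def TesteTlf_alt (tlf : List Int) : List (List Int) :=
  let cant1 := tlf.length - 1
  let rows := (List.range cant1).foldl
    (fun (rs : List (List Int)) _ => rs.map (fun r => 0 :: r) ++ rs.map (fun r => 1 :: r))
    [([] : List Int)]
  let thr := tlf.getD (tlf.length - 1) 0
  rows.map (fun r => r ++ [if (List.zipWith (fun w b => w * b) tlf r).sum ≥ thr then 1 else 0])

-- ===== PRECONDITION & SPEC =====
-- Pre_ excludes only the empty list, on which Python A raises (2**-1 is a float: TypeError).
def Pre_TesteTlf (tlf : List Int) : Prop := tlf ≠ []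
instance (tlf : List Int) : Decidable (Pre_TesteTlf tlf) := by unfold Pre_TesteTlf; infer_instance
def pvWitness_TesteTlf : List Int := [1, -2, 3]

def Spec_TesteTlf (tlf : List Int) (out : List (List Int)) : Prop := out = TesteTlf_alt tlf
instance (tlf : List Int) (out : List (List Int)) : Decidable (Spec_TesteTlf tlf out) := by unfold Spec_TesteTlf; infer_instance

-- ===== CLAIM (what is proved, stated in full; the proofs are below) =====
def Claim_equal_TesteTlf : Prop := ∀ (tlf : List Int), Dom_TesteTlf tlf → Pre_TesteTlf tlf → Spec_TesteTlf tlf (TesteTlf tlf)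

-- ===== LEMMAS AND PROOFS =====

lemma pvBinDigits_pos {n : Nat} (h : n ≠ 0) :
    pvBinDigits n = pvBinDigits (n / 2) ++ [((n % 2 : Nat) : Int)] := by
  cases n with
  | zero => exact absurd rfl h
  | succ m => rw [pvBinDigits]

lemma pvBinDigits_len : ∀ k n, n < 2 ^ k → (pvBinDigits n).length ≤ k := by
  intro k
  induction k with
  | zero => intro n h; interval_cases n; simp [pvBinDigits]
  | succ k ih =>
    intro n h
    cases Nat.eq_zero_or_pos n with
    | inl h0 => subst h0; simp [pvBinDigits]
    | inr hp =>
      rw [pvBinDigits_pos (Nat.pos_iff_ne_zero.mp hp)]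
      have h2 : n / 2 < 2 ^ k := by
        have := Nat.pow_succ 2 k
        omega
      have := ih (n / 2) h2
      simp [List.length_append]
      omega

lemma pvBinDigits_top : ∀ k n, n < 2 ^ k →
    pvBinDigits (2 ^ k + n) = 1 :: pvZfill k (pvBinDigits n) := by
  intro k
  induction k with
  | zero =>
    intro n h; interval_cases n
    norm_num
    rw [pvBinDigits_pos one_ne_zero]
    simp [pvBinDigits, pvZfill]
  | succ k ih =>
    intro n h
    have hne : 2 ^ (k+1) + n ≠ 0 := by positivity
    rw [pvBinDigits_pos hne]
    have hdiv : (2 ^ (k+1) + n) / 2 = 2 ^ k + n / 2 := by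
      have : 2 ^ (k+1) = 2 * 2 ^ k := by ring
      omega
    have hmod : (2 ^ (k+1) + n) % 2 = n % 2 := by
      have : 2 ^ (k+1) = 2 * 2 ^ k := by ring
      omega
    have h2 : n / 2 < 2 ^ k := by
      have : 2 ^ (k+1) = 2 * 2 ^ k := by ring
      omega
    rw [hdiv, hmod, ih (n / 2) h2]
    cases Nat.eq_zero_or_pos n with
    | inl h0 =>
      subst h0
      simp [pvBinDigits, pvZfill, List.replicate_succ' (n := k)]
    | inr hp =>
      rw [pvZfill, pvZfill, pvBinDigits_pos (Nat.pos_iff_ne_zero.mp hp)]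
      have hlen : (pvBinDigits (n / 2)).length ≤ k := pvBinDigits_len k _ h2
      simp [List.length_append]

lemma zfill_cons_zero {s : List Int} {k : Nat} (h : s.length ≤ k) :
    (0 : Int) :: pvZfill k s = pvZfill (k+1) s := by
  rw [pvZfill, pvZfill, show k + 1 - s.length = (k - s.length) + 1 by omega, List.replicate_succ]
  simp

lemma zfill_len {s : List Int} {k : Nat} (h : s.length ≤ k) : (pvZfill k s).length = k := by
  simp [pvZfill]; omega

lemma rows_eq (k : Nat) :
    (List.range k).foldl
      (fun (rs : List (List Int)) _ => rs.map (fun r => 0 :: r) ++ rs.map (fun r => 1 :: r))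
      [([] : List Int)]
    = (List.range (2 ^ k)).map (fun i => pvZfill k (pvBinDigits i)) := by
  induction k with
  | zero => simp [pvZfill, pvBinDigits]
  | succ k ih =>
    rw [List.range_succ, List.foldl_append, ih]
    rw [show (2:Nat) ^ (k+1) = 2 ^ k + 2 ^ k by ring, List.range_add, List.map_append]
    simp only [List.foldl_cons, List.foldl_nil, List.map_map]
    congr 1
    · apply List.map_congr_left
      intro i hi
      have hi' := List.mem_range.mp hi
      exact zfill_cons_zero (pvBinDigits_len k i hi')
    · apply List.map_congr_left
      intro i hi
      have hi' := List.mem_range.mp hi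
      have htop := pvBinDigits_top k i hi'
      have hlen : (pvZfill k (pvBinDigits i)).length = k := zfill_len (pvBinDigits_len k i hi')
      show (1 : Int) :: pvZfill k (pvBinDigits i) = pvZfill (k+1) (pvBinDigits (2 ^ k + i))
      have hl : (pvBinDigits i).length ≤ k := pvBinDigits_len k i hi'
      rw [htop]
      simp [pvZfill]
      omega

lemma set_append_boundary (v : List Int) (x a : Int) (rest : List Int) :
    (v ++ x :: rest).set v.length a = v ++ a :: rest := by
  induction v with
  | nil => simp
  | cons h t ih => simp [List.set, ih]

lemma zip_sum_append : ∀ (tlf v : List Int) (a : Int), v.length < tlf.length →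
    (List.zipWith (fun w b => w * b) tlf (v ++ [a])).sum
      = (List.zipWith (fun w b => w * b) tlf v).sum + tlf.getD v.length 0 * a := by
  intro tlf
  induction tlf with
  | nil => intro v a h; simp at h
  | cons t ts ih =>
    intro v a h
    cases v with
    | nil => simp
    | cons b v' =>
      simp only [List.cons_append, List.zipWith_cons_cons, List.sum_cons, List.length_cons]
      rw [ih v' a (by simpa using h)]
      simp [List.getD_cons_succ]
      ring

lemma fill_fold (tlf : List Int) : ∀ (v : List Int) (m : Nat), v.length ≤ m → v.length ≤ tlf.length →
    (List.range v.length).foldl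
      (fun (st : List Int × Int) j =>
        (st.1.set j (v.getD j 0), st.2 + tlf.getD j 0 * v.getD j 0))
      (List.replicate m (0 : Int), (0 : Int))
    = (v ++ List.replicate (m - v.length) 0, (List.zipWith (fun w b => w * b) tlf v).sum) := by
  intro v
  induction v using List.reverseRecOn with
  | nil => intro m _ _; simp
  | append_singleton v a ih =>
    intro m hv ht
    have hlen : (v ++ [a]).length = v.length + 1 := by simp
    rw [hlen, List.range_succ, List.foldl_append]
    have hcongr :
        (List.range v.length).foldl
          (fun (st : List Int × Int) j =>
            (st.1.set j ((v ++ [a]).getD j 0), st.2 + tlf.getD j 0 * (v ++ [a]).getD j 0))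
          (List.replicate m (0 : Int), (0 : Int))
        = (List.range v.length).foldl
          (fun (st : List Int × Int) j =>
            (st.1.set j (v.getD j 0), st.2 + tlf.getD j 0 * v.getD j 0))
          (List.replicate m (0 : Int), (0 : Int)) := by
      apply PySem.List.foldl_congr_mem
      intro acc j hj
      have hj' : j < v.length := List.mem_range.mp hj
      rw [List.getD_append _ _ _ _ hj']
    rw [hcongr, ih m (by omega) (by omega)]
    have hga : (v ++ [a]).getD v.length 0 = a := by
      simp [List.getD_append_right]
    have hrep : List.replicate (m - v.length) (0 : Int) = 0 :: List.replicate (m - (v.length + 1)) 0 := by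
      rw [show m - v.length = (m - (v.length + 1)) + 1 by omega, List.replicate_succ]
    simp only [List.foldl_cons, List.foldl_nil, hga]
    rw [hrep, set_append_boundary, zip_sum_append tlf v a (by omega)]
    simp

lemma zfill_pyBin {k : Nat} (hk : 1 ≤ k) (n : Nat) :
    pvZfill k (pvBin n) = pvZfill k (pvBinDigits n) := by
  by_cases h : n = 0
  · subst h
    rw [pvBin, if_pos rfl]
    show pvZfill k [0] = pvZfill k (pvBinDigits 0)
    rw [show (pvBinDigits 0) = [] by rw [pvBinDigits], pvZfill, pvZfill]
    simp only [List.length_cons, List.length_nil, List.append_nil, Nat.sub_zero]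
    rw [show k = (k - 1) + 1 by omega, List.replicate_succ']
    simp [show k - 1 + 1 - 1 = k - 1 by omega]
  · rw [pvBin, if_neg h]

theorem main_eq (tlf : List Int) (hpre : tlf ≠ []) : TesteTlf tlf = TesteTlf_alt tlf := by
  cases tlf with
  | nil => exact absurd rfl hpre
  | cons t rest =>
    cases rest with
    | nil =>
      norm_num [TesteTlf, TesteTlf_alt, pvBin, pvZfill, pvBinDigits, List.range_succ]
    | cons u rest' =>
      simp only [TesteTlf, TesteTlf_alt]
      have hlen : (t :: u :: rest').length - 1 = rest'.length + 1 := by simp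
      rw [hlen]
      set L := rest'.length + 1 with hLdef
      rw [rows_eq L, List.map_map]
      apply List.map_congr_left
      intro i hi
      have hi' : i < 2 ^ L := List.mem_range.mp hi
      have h1 : 1 ≤ L := by omega
      have hbl : (pvBinDigits i).length ≤ L := pvBinDigits_len L i hi'
      have hbin : pvZfill L (pvBin i) = pvZfill L (pvBinDigits i) := zfill_pyBin h1 i
      have hlv : (pvZfill L (pvBin i)).length = L := by rw [hbin]; exact zfill_len hbl
      have hlt : (t :: u :: rest').length = L + 1 := by simp [hLdef]
      simp only [Function.comp]
      rw [fill_fold (t :: u :: rest') (pvZfill L (pvBin i)) (L + 1) (by omega) (by omega)]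
      rw [hlv, show L + 1 - L = 1 by omega, List.replicate_one]
      have hsl : (pvZfill L (pvBin i) ++ [(0 : Int)]).length - 1 = (pvZfill L (pvBin i)).length := by
        simp
      rw [hsl, set_append_boundary, hbin]

-- ===== VERDICT (by name: the statement is the Claim_ definition above) =====
theorem TesteTlf_spec : Claim_equal_TesteTlf := by
  intro tlf _ hpre
  simpa [Spec_TesteTlf] using main_eq tlf hpre
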